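-- pv_equiv track=rewrite | github.com/akriptonn/VendingMachinePython | GUI.py | getreal
-- ===== SOURCE A (Python) =====
-- def getreal(x):
--
--     for idx in range(len(x)):
--         if(x[-(idx+1)]=='/'):
--             i = len(x) - idx
--             param = ''
--             while (i<len(x)):
--                 param += x[i]
--                 i+=1
--             return param
-- ===== SOURCE B (Python) =====
-- def getreal(x):
--     res = None
--     for c in x:
--         if c == '/':
--             res = ''
--         elif res is not None:
--             res += c
--     return res
-- ===== Notes on version B (the rewrite author's own statement) =====
-- stated objective: simpler
-- what changed: A searches backward with negative indexing for the last delimiter and then copies the suffix with an inner index-driven while loop; B is a single forward pass over the characters that maintains the suffix seen since the most recent delimiter (None until one is seen).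
import Mathlib
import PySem

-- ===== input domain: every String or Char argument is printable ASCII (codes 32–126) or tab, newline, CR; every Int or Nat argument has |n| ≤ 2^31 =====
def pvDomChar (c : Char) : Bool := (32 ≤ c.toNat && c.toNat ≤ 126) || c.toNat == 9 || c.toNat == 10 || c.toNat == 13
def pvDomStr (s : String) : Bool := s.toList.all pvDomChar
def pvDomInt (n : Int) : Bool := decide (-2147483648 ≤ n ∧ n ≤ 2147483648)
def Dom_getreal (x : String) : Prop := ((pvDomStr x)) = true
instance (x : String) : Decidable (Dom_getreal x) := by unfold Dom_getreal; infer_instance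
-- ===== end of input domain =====

-- B replaces A's backward search for the last '/' (negative indexing) plus an inner
-- index-driven copy loop by a single forward pass maintaining the suffix since the
-- most recent '/'; objective: simpler. Return values agree on every string.

-- ===== PORT A =====
-- inner 'while (i<len(x)): param += x[i]; i+=1'
def getrealWhile (xs : List Char) (i : Nat) (param : List Char) : List Char :=
  if _h : i < xs.length then getrealWhile xs (i + 1) (param ++ [xs[i]]) else param
termination_by xs.length - i

-- 'for idx in range(len(x)): if x[-(idx+1)] == '/': …'
def getrealLoop (xs : List Char) (idx : Nat) : Option (List Char) :=
  if _h : idx < xs.length then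
    if PySem.List.pyGet? xs (-((idx : Int) + 1)) = some '/' then
      some (getrealWhile xs (xs.length - idx) [])
    else getrealLoop xs (idx + 1)
  else none
termination_by xs.length - idx

def getreal (x : String) : Option String :=
  (getrealLoop x.toList 0).map String.ofList

-- ===== PORT B =====
def getreal_alt (x : String) : Option String :=
  (x.toList.foldl
    (fun res c =>
      if c = '/' then some ([] : List Char)
      else match res with
        | none => none
        | some p => some (p ++ [c]))
    none).map String.ofList

-- ===== PRECONDITION & SPEC =====
def Spec_getreal (x : String) (out : Option String) : Prop := out = getreal_alt x
instance (x : String) (out : Option String) : Decidable (Spec_getreal x out) := by unfold Spec_getreal; infer_instance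

-- ===== CLAIM (what is proved, stated in full; the proofs are below) =====
def Claim_equal_getreal : Prop := ∀ (x : String), Dom_getreal x → Spec_getreal x (getreal x)

-- ===== LEMMAS AND PROOFS =====

-- chars of the argument before its first '/', in order; none if no '/'
def gSpec : List Char → Option (List Char)
  | [] => none
  | c :: t => if c = '/' then some [] else (gSpec t).map (fun p => c :: p)

theorem getrealWhile_eq (xs : List Char) (i : Nat) (param : List Char) :
    getrealWhile xs i param = param ++ xs.drop i := by
  fun_induction getrealWhile xs i param with
  | case1 i param h ih =>
    rw [ih, List.drop_eq_getElem_cons h]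
    simp
  | case2 i param h =>
    have : xs.drop i = [] := List.drop_eq_nil_of_le (by omega)
    simp [this]

theorem getrealLoop_eq (xs : List Char) (idx : Nat) :
    getrealLoop xs idx =
      (gSpec (xs.reverse.drop idx)).map
        (fun p => p.reverse ++ (xs.reverse.take idx).reverse) := by
  fun_induction getrealLoop xs idx with
  | case1 idx h hc =>
    have hidx : idx < xs.reverse.length := by simpa using h
    have hget : xs.reverse[idx] = '/' := by
      have : PySem.List.pyGet? xs (-(((idx + 1 : Nat)) : Int)) = some '/' := by
        push_cast; exact hc
      rw [PySem.List.pyGet?_neg_natCast xs (idx + 1) (by omega) (by omega)] at this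
      rw [show xs.length - (idx + 1) = xs.length - 1 - idx from by omega] at this
      rw [List.getElem?_eq_getElem (by omega)] at this
      rw [List.getElem_reverse]
      exact Option.some.inj this
    rw [List.drop_eq_getElem_cons hidx, hget]
    rw [getrealWhile_eq, List.take_reverse, List.reverse_reverse]
    simp [gSpec]
  | case2 idx h hc ih =>
    have hidx : idx < xs.reverse.length := by simpa using h
    have hget : xs.reverse[idx] ≠ '/' := by
      intro hgc
      apply hc
      have h1 : PySem.List.pyGet? xs (-(((idx + 1 : Nat)) : Int)) = some '/' := by
        rw [PySem.List.pyGet?_neg_natCast xs (idx + 1) (by omega) (by omega)]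
        rw [show xs.length - (idx + 1) = xs.length - 1 - idx from by omega]
        rw [List.getElem?_eq_getElem (by omega)]
        rw [List.getElem_reverse] at hgc
        rw [hgc]
      push_cast at h1
      exact h1
    rw [ih, List.drop_eq_getElem_cons hidx]
    simp only [gSpec, if_neg hget]
    have htake : xs.reverse.take (idx + 1) = xs.reverse.take idx ++ [xs.reverse[idx]] := by
      rw [List.take_add_one, List.getElem?_eq_getElem hidx]; rfl
    rw [htake]
    cases gSpec (xs.reverse.drop (idx + 1)) <;> simp
  | case3 idx h =>
    have : xs.reverse.drop idx = [] := List.drop_eq_nil_of_le (by simp; omega)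
    simp [this, gSpec]

theorem foldl_eq (xs : List Char) :
    xs.foldl
      (fun res c =>
        if c = '/' then some ([] : List Char)
        else match res with
          | none => none
          | some p => some (p ++ [c]))
      none
    = (gSpec xs.reverse).map List.reverse := by
  induction xs using List.reverseRecOn with
  | nil => simp [gSpec]
  | append_singleton xs c ih =>
    rw [List.foldl_append, ih]
    simp only [List.foldl, List.reverse_append, List.reverse_cons, List.reverse_nil,
      List.nil_append, List.singleton_append, gSpec]
    by_cases hc : c = '/'
    · simp [hc]
    · simp only [if_neg hc]
      cases gSpec xs.reverse <;> simp

-- ===== VERDICT (by name: the statement is the Claim_ definition above) =====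
theorem getreal_spec : Claim_equal_getreal := by
  intro x _
  unfold Spec_getreal getreal getreal_alt
  rw [getrealLoop_eq, foldl_eq]
  simp
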